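-- pv_equiv track=rewrite | github.com/thumbe12856/competitive-programming | cf/1200 Flip the Bits/solve.py | solve
-- ===== SOURCE A (Python) =====
-- def solve(N, S, P):
--     cs = [[0, 0] for _ in range(N)]
--     for i in range(N):
--         cs[i][0] = cs[i - 1][0]
--         cs[i][1] = cs[i - 1][1]
--         cs[i][int(S[i])] += 1
--
--     flip_time = 0
--     for i in range(N - 1, -1, -1):
--         if (S[i] != P[i] and not (flip_time & 1)) or \
--             (S[i] == P[i] and flip_time & 1):
--             if (i + 1) & 1:
--                 return "No"
--             else:
--                 if cs[i][0] != cs[i][1]: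
--                     return "No"
--
--             flip_time += 1
--
--     return "Yes"
-- ===== SOURCE B (Python) =====
-- def solve(N, S, P):
--     # Stateless forward pass: a prefix flip is forced exactly at positions
--     # where the mismatch indicator (S[i] != P[i]) differs from its right
--     # neighbour's (False past the end); each such boundary needs an
--     # even-length, zeros/ones-balanced prefix, else the answer is "No".
--     z = o = 0
--     for i in range(N):
--         if S[i] == '0':
--             z += 1
--         else:
--             o += 1
--         cur = S[i] != P[i]
--         nxt = S[i + 1] != P[i + 1] if i + 1 < N else False
--         if cur != nxt and ((i + 1) & 1 or z != o):
--             return "No"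
--     return "Yes"
-- ===== Notes on version B (the rewrite author's own statement) =====
-- stated objective: alternative
-- what changed: B replaces A's stateful backward scan (prefix-count table built in a first pass, then a right-to-left loop carrying a flip parity counter) by a stateless single forward pass: a flip boundary is detected locally as a change of the mismatch indicator S[i]!=P[i] versus its right neighbour, and zero/one counts are maintained incrementally, so no table and no flip state exist.
import Mathlib
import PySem

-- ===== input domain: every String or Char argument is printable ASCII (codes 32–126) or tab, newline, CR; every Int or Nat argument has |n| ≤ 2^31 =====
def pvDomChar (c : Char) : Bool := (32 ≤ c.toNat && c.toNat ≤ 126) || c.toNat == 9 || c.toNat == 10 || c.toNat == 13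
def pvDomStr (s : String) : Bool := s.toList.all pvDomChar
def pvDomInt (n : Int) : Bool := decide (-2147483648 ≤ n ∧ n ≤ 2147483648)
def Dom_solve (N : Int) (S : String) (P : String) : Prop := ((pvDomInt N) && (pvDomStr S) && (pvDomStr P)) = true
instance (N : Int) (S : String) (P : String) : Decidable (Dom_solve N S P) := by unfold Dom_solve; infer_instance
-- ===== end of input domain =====

-- B replaces A's backward flip-parity scan over a precomputed prefix-count table by a
-- stateless forward pass detecting flip boundaries locally (objective: alternative).

-- ===== PORT A =====
-- first loop: builds the prefix-count table cs in place (cs[i-1] wraps to cs[-1] at i = 0)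
def solveA_build (s : List Char) : List Int → List (Int × Int) → List (Int × Int)
  | [], cs => cs
  | i :: rest, cs =>
      let prev := (PySem.List.pyGet? cs (i - 1)).getD (0, 0)
      -- int(S[i]) used as an index into cs[i]; under Pre_ it is 0 or 1 (Python raises otherwise)
      let d := ((PySem.List.pyGet? s i).getD '0').toNat - 48
      let cur := if d = 0 then (prev.1 + 1, prev.2) else (prev.1, prev.2 + 1)
      solveA_build s rest (cs.set i.toNat cur)

-- second loop, with the early `return "No"` encoded as the recursion stopping
def solveA_scan (s p : List Char) (cs : List (Int × Int)) : List Int → Int → String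
  | [], _ => "Yes"
  | i :: rest, ft =>
      let si := (PySem.List.pyGet? s i).getD ' '
      let pc := (PySem.List.pyGet? p i).getD ' '
      if (si ≠ pc ∧ ft % 2 = 0) ∨ (si = pc ∧ ft % 2 = 1) then
        if (i + 1) % 2 = 1 then "No"
        else
          let c := (PySem.List.pyGet? cs i).getD (0, 0)
          if c.1 ≠ c.2 then "No"
          else solveA_scan s p cs rest (ft + 1)
      else solveA_scan s p cs rest ft

def solve (N : Int) (S : String) (P : String) : String :=
  let s := S.toList
  let cs := solveA_build s (PySem.List.pyRange 0 N 1) (List.replicate N.toNat ((0 : Int), (0 : Int)))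
  solveA_scan s P.toList cs (PySem.List.pyRange (N - 1) (-1) (-1)) 0

-- ===== PORT B =====
-- forward loop with running zero/one counts; the early `return "No"` stops the recursion
def solveB_loop (s p : List Char) (N : Int) : List Int → Int → Int → String
  | [], _, _ => "Yes"
  | i :: rest, z, o =>
      let si := (PySem.List.pyGet? s i).getD ' '
      let z' := if si = '0' then z + 1 else z
      let o' := if si = '0' then o else o + 1
      let cur := si != (PySem.List.pyGet? p i).getD ' '
      let nxt := if i + 1 < N then
          ((PySem.List.pyGet? s (i + 1)).getD ' ') != ((PySem.List.pyGet? p (i + 1)).getD ' ')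
        else false
      if (cur != nxt) && (((i + 1) % 2 == 1) || (z' != o')) then "No"
      else solveB_loop s p N rest z' o'

def solve_alt (N : Int) (S : String) (P : String) : String :=
  solveB_loop S.toList P.toList N (PySem.List.pyRange 0 N 1) 0 0

-- ===== PRECONDITION & SPEC =====
-- Pre_ excludes exactly the inputs where the Python A raises: N > len(S) or N > len(P)
-- (IndexError) or some of the first N characters of S not '0'/'1' (ValueError or
-- IndexError from int(S[i]) used as a list index).
def Pre_solve (N : Int) (S : String) (P : String) : Prop :=
  N ≤ 0 ∨ (N ≤ S.toList.length ∧ N ≤ P.toList.length ∧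
    (S.toList.take N.toNat).all (fun c => c == '0' || c == '1') = true)
instance (N : Int) (S : String) (P : String) : Decidable (Pre_solve N S P) := by
  unfold Pre_solve; infer_instance

def pvWitness_solve : Int × String × String := (4, "0110", "1010")

def Spec_solve (N : Int) (S : String) (P : String) (out : String) : Prop := out = solve_alt N S P
instance (N : Int) (S : String) (P : String) (out : String) : Decidable (Spec_solve N S P out) := by unfold Spec_solve; infer_instance

-- ===== CLAIM (what is proved, stated in full; the proofs are below) =====
def Claim_equal_solve : Prop := ∀ (N : Int) (S : String) (P : String), Dom_solve N S P → Pre_solve N S P → Spec_solve N S P (solve N S P)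

-- ===== LEMMAS AND PROOFS =====

-- number of occurrences of c among the first n characters, as an Int
def pvCnt (s : List Char) (c : Char) (n : Nat) : Int := ((s.take n).countP (· == c) : Int)

-- the prefix-count pair A's table stores at index n-1
def pvPref (s : List Char) (n : Nat) : Int × Int := (pvCnt s '0' n, pvCnt s '1' n)

-- mismatch indicator, false past the end
def pvT (s p : List Char) (N i : Nat) : Bool :=
  if i < N then (s[i]?.getD ' ') != (p[i]?.getD ' ') else false

-- boundary i exists and its prefix is odd or unbalanced
def pvFail (s p : List Char) (N i : Nat) : Bool :=
  (pvT s p N i != pvT s p N (i + 1)) &&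
    (((i + 1) % 2 == 1) || ((pvPref s (i + 1)).1 != (pvPref s (i + 1)).2))

lemma pvCnt_succ (s : List Char) (c : Char) (n : Nat) (h : n < s.length) :
    pvCnt s c (n + 1) = pvCnt s c n + (if s[n] = c then 1 else 0) := by
  unfold pvCnt
  rw [List.take_add_one, List.getElem?_eq_getElem h, List.countP_append]
  by_cases hc : s[n] = c
  · simp [hc]
  · simp [hc]

lemma getElem_mem_take (s : List Char) (m n : Nat) (h1 : m < n) (h2 : m < s.length) :
    s[m] ∈ s.take n := by
  have h3 : m < (s.take n).length := by simp; omega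
  have h4 := List.getElem_mem h3
  simpa [List.getElem_take] using h4

lemma build_inv (s : List Char) (N : Nat) (hN : N ≤ s.length)
    (hs : ∀ c ∈ s.take N, c = '0' ∨ c = '1') :
    ∀ (fuel j : Nat) (cs : List (Int × Int)), N - j = fuel → j ≤ N → cs.length = N →
    (∀ k, k < j → cs[k]? = some (pvPref s (k + 1))) →
    (∀ k, j ≤ k → k < N → cs[k]? = some (0, 0)) →
    ∀ k, k < N →
      (solveA_build s (PySem.List.pyRange (j : Int) (N : Int) 1) cs)[k]? = some (pvPref s (k + 1)) := by
  intro fuel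
  induction fuel with
  | zero =>
    intro j cs hfuel hj hlen h1 h2 k hk
    have hje : j = N := by omega
    subst hje
    rw [PySem.List.pyRange_one_eq_nil (by omega)]
    exact h1 k hk
  | succ f ihf =>
    intro j cs hfuel hj hlen h1 h2 k hk
    have hjN : j < N := by omega
    have hjs : j < s.length := by omega
    rw [PySem.List.pyRange_one_cons (by exact_mod_cast hjN)]
    simp only [solveA_build]
    have hprev : (PySem.List.pyGet? cs ((j : Int) - 1)).getD (0, 0) = pvPref s j := by
      rcases Nat.eq_zero_or_pos j with h0 | hpos
      · subst h0
        rw [show ((0 : Nat) : Int) - 1 = -1 by norm_num, PySem.List.pyGet?_neg_one]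
        have hlast : cs.getLast? = cs[N - 1]? := by
          rw [List.getLast?_eq_getElem?]; congr 1; omega
        rw [hlast, h2 (N - 1) (by omega) (by omega)]
        simp [pvPref, pvCnt]
      · rw [show (j : Int) - 1 = ((j - 1 : Nat) : Int) by push_cast [hpos]; omega,
            PySem.List.pyGet?_natCast, h1 (j - 1) (by omega)]
        have hje : j - 1 + 1 = j := by omega
        simp [hje]
    have hsj : (PySem.List.pyGet? s (j : Int)).getD '0' = s[j] := by
      rw [PySem.List.pyGet?_natCast, List.getElem?_eq_getElem hjs]; rfl
    have hbin : s[j] = '0' ∨ s[j] = '1' := hs s[j] (getElem_mem_take s j N hjN hjs)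
    have e0 := pvCnt_succ s '0' j hjs
    have e1 := pvCnt_succ s '1' j hjs
    have hcur : (if ((PySem.List.pyGet? s ((j : Int))).getD '0').toNat - 48 = 0 then
          (((PySem.List.pyGet? cs ((j : Int) - 1)).getD (0, 0)).1 + 1,
           ((PySem.List.pyGet? cs ((j : Int) - 1)).getD (0, 0)).2)
        else
          (((PySem.List.pyGet? cs ((j : Int) - 1)).getD (0, 0)).1,
           ((PySem.List.pyGet? cs ((j : Int) - 1)).getD (0, 0)).2 + 1)) = pvPref s (j + 1) := by
      rw [hprev, hsj]
      rcases hbin with h0 | h1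
      · rw [h0] at e0 e1
        rw [if_pos rfl] at e0
        rw [if_neg (by decide)] at e1
        rw [h0, if_pos (by decide)]
        simp only [pvPref, Prod.mk.injEq]
        constructor <;> omega
      · rw [h1] at e0 e1
        rw [if_neg (by decide)] at e0
        rw [if_pos rfl] at e1
        rw [h1, if_neg (by decide)]
        simp only [pvPref, Prod.mk.injEq]
        constructor <;> omega
    rw [hcur]
    rw [show (j : Int) + 1 = ((j + 1 : Nat) : Int) by push_cast; ring, Int.toNat_natCast]
    exact ihf (j + 1) (cs.set j (pvPref s (j + 1))) (by omega) (by omega)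
      (by rw [List.length_set]; exact hlen)
      (by
        intro k2 hk2
        rcases Nat.lt_succ_iff_lt_or_eq.mp hk2 with hlt | heq
        · rw [List.getElem?_set_ne (by omega)]; exact h1 k2 hlt
        · subst heq; rw [List.getElem?_set_self (by omega)])
      (by
        intro k2 hk2 hk2'
        rw [List.getElem?_set_ne (by omega)]; exact h2 k2 (by omega) hk2')
      k hk

-- A's backward scan returns "No" exactly when some boundary below n fails
lemma scanA_spec (s p : List Char) (N : Nat) (cs : List (Int × Int))
    (hcs : ∀ k, k < N → cs[k]? = some (pvPref s (k + 1))) :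
    ∀ (n : Nat), n ≤ N → ∀ (ft : Int), 0 ≤ ft →
    ft % 2 = (if pvT s p N n then 1 else 0) →
    solveA_scan s p cs (PySem.List.pyRange ((n : Int) - 1) (-1) (-1)) ft =
      if (List.range n).any (pvFail s p N) then "No" else "Yes" := by
  intro n
  induction n with
  | zero =>
    intro _ ft _ _
    rw [show ((0 : Nat) : Int) - 1 = -1 by norm_num,
      PySem.List.pyRange_neg_one_eq_nil (by norm_num)]
    simp [solveA_scan]
  | succ m ih =>
    intro hmn ft hft hpar
    have hm : m < N := by omega
    rw [show ((m + 1 : Nat) : Int) - 1 = (m : Int) by push_cast; ring,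
      PySem.List.pyRange_neg_one_cons (by omega),
      List.range_succ, List.any_append]
    simp only [solveA_scan, List.any_cons, List.any_nil, Bool.or_false]
    set si := (PySem.List.pyGet? s ((m : Int))).getD ' ' with hsi
    set pc := (PySem.List.pyGet? p ((m : Int))).getD ' ' with hpc
    have htm : pvT s p N m = (si != pc) := by
      rw [pvT, if_pos hm, hsi, hpc, PySem.List.pyGet?_natCast, PySem.List.pyGet?_natCast]
    have hcond : ((si ≠ pc ∧ ft % 2 = 0) ∨ (si = pc ∧ ft % 2 = 1)) ↔
        (pvT s p N m != pvT s p N (m + 1)) = true := by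
      rw [htm]
      cases hv : pvT s p N (m + 1) <;> rw [hv] at hpar <;> simp at hpar <;>
        by_cases hsp : si = pc <;> simp [hsp, bne, hpar]
    have hmod : (((m : Int) + 1) % 2 = 1) ↔ (((m + 1) % 2 == 1) = true) := by
      rw [Nat.beq_eq_true_eq]
      omega
    by_cases hcb : (pvT s p N m != pvT s p N (m + 1)) = true
    · rw [if_pos (hcond.mpr hcb)]
      by_cases hodd : ((m : Int) + 1) % 2 = 1
      · rw [if_pos hodd]
        have : pvFail s p N m = true := by
          rw [pvFail, hcb, Bool.true_and, Bool.or_eq_true]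
          exact Or.inl (hmod.mp hodd)
        rw [this]; simp
      · rw [if_neg hodd]
        have hc : (PySem.List.pyGet? cs ((m : Int))).getD (0, 0) = pvPref s (m + 1) := by
          rw [PySem.List.pyGet?_natCast, hcs m hm]; rfl
        rw [hc]
        by_cases hne : (pvPref s (m + 1)).1 ≠ (pvPref s (m + 1)).2
        · rw [if_pos hne]
          have : pvFail s p N m = true := by
            rw [pvFail, hcb, Bool.true_and, Bool.or_eq_true]
            exact Or.inr (by simp [bne_iff_ne, hne])
          rw [this]; simp
        · rw [if_neg hne]
          have hfm : pvFail s p N m = false := by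
            rw [pvFail, hcb, Bool.true_and, Bool.or_eq_false_iff]
            refine ⟨?_, by simp [bne]; simp_all⟩
            have h2 : ¬ ((m + 1) % 2 = 1) := fun h => hodd (by omega)
            simp [h2]
          rw [hfm, Bool.or_false]
          refine ih (by omega) (ft + 1) (by omega) ?_
          have hflip : pvT s p N m = !pvT s p N (m + 1) := by
            cases h1 : pvT s p N m <;> cases h2 : pvT s p N (m + 1) <;> simp_all [bne]
          rw [hflip]
          cases hv : pvT s p N (m + 1) <;> rw [hv] at hpar <;> simp at hpar ⊢ <;> omega
    · rw [if_neg (fun h => hcb (hcond.mp h))]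
      have heq : pvT s p N m = pvT s p N (m + 1) := by
        cases h1 : pvT s p N m <;> cases h2 : pvT s p N (m + 1) <;> simp_all [bne]
      have hfm : pvFail s p N m = false := by
        rw [pvFail]; simp [hcb]
      rw [hfm, Bool.or_false]
      exact ih (by omega) ft hft (by rw [hpar, heq])

-- B's forward loop returns "No" exactly when some boundary in [n, N) fails
lemma loopB_spec (s p : List Char) (N : Nat) (hN : N ≤ s.length)
    (hs : ∀ c ∈ s.take N, c = '0' ∨ c = '1') :
    ∀ (fuel n : Nat), N - n = fuel → n ≤ N →
    ∀ (z o : Int), z = pvCnt s '0' n → o = pvCnt s '1' n →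
    solveB_loop s p (N : Int) (PySem.List.pyRange (n : Int) (N : Int) 1) z o =
      if (List.range' n (N - n)).any (pvFail s p N) then "No" else "Yes" := by
  intro fuel
  induction fuel with
  | zero =>
    intro n hfuel hn z o _ _
    have : n = N := by omega
    subst this
    rw [PySem.List.pyRange_one_eq_nil (by omega)]
    simp [solveB_loop]
  | succ f ihf =>
    intro n hfuel hn z o hz ho
    have hnN : n < N := by omega
    have hns : n < s.length := by omega
    rw [PySem.List.pyRange_one_cons (by exact_mod_cast hnN),
      show N - n = (N - (n + 1)) + 1 by omega, List.range'_succ, List.any_cons]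
    simp only [solveB_loop]
    have hsi : (PySem.List.pyGet? s (n : Int)).getD ' ' = s[n] := by
      rw [PySem.List.pyGet?_natCast, List.getElem?_eq_getElem hns]; rfl
    have hbin : s[n] = '0' ∨ s[n] = '1' := hs s[n] (getElem_mem_take s n N hnN hns)
    have e0 := pvCnt_succ s '0' n hns
    have e1 := pvCnt_succ s '1' n hns
    have hz' : (if s[n] = '0' then z + 1 else z) = pvCnt s '0' (n + 1) := by
      by_cases h0 : s[n] = '0' <;> simp [h0] at e0 ⊢ <;> omega
    have ho' : (if s[n] = '0' then o else o + 1) = pvCnt s '1' (n + 1) := by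
      rcases hbin with h0 | h1
      · rw [if_pos h0]
        rw [h0, if_neg (by decide)] at e1
        omega
      · rw [if_neg (by rw [h1]; decide)]
        rw [h1, if_pos rfl] at e1
        omega
    have hcast : (n : Int) + 1 = ((n + 1 : Nat) : Int) := by push_cast; ring
    have hnxt : (if (n : Int) + 1 < (N : Int) then
          ((PySem.List.pyGet? s ((n : Int) + 1)).getD ' ' !=
            (PySem.List.pyGet? p ((n : Int) + 1)).getD ' ')
        else false) = pvT s p N (n + 1) := by
      rw [pvT, hcast, PySem.List.pyGet?_natCast, PySem.List.pyGet?_natCast]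
      by_cases h : n + 1 < N
      · rw [if_pos (by exact_mod_cast h), if_pos h]
      · rw [if_neg (by exact_mod_cast h), if_neg h]
    have hcur : (s[n] != (PySem.List.pyGet? p (n : Int)).getD ' ') = pvT s p N n := by
      rw [pvT, if_pos hnN, PySem.List.pyGet?_natCast, List.getElem?_eq_getElem hns]
      rfl
    have hpar : ((((n : Int) + 1) % 2 == 1)) = (((n + 1) % 2 == 1)) := by
      by_cases h : (n + 1) % 2 = 1
      · rw [show (((n + 1) % 2 == 1)) = true from beq_iff_eq.mpr h,
          show ((((n : Int) + 1) % 2 == 1)) = true from beq_iff_eq.mpr (by omega)]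
      · rw [show (((n + 1) % 2 == 1)) = false from beq_eq_false_iff_ne.mpr h,
          show ((((n : Int) + 1) % 2 == 1)) = false from beq_eq_false_iff_ne.mpr (by omega)]
    rw [hsi, hnxt, hcur, hpar, hz', ho']
    have hfe : ((pvT s p N n != pvT s p N (n + 1)) &&
        (((n + 1) % 2 == 1) || (pvCnt s '0' (n + 1) != pvCnt s '1' (n + 1)))) =
        pvFail s p N n := by
      simp [pvFail, pvPref]
    rw [hfe]
    cases hF : pvFail s p N n
    · rw [if_neg (by simp), Bool.false_or, hcast]
      exact ihf (n + 1) (by omega) (by omega) _ _ rfl rfl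
    · rw [if_pos rfl, if_pos (by simp)]

-- ===== VERDICT (by name: the statement is the Claim_ definition above) =====
theorem solve_spec : Claim_equal_solve := by
  intro N S P _ hpre
  unfold Spec_solve solve solve_alt
  by_cases hN : N ≤ 0
  · rw [PySem.List.pyRange_neg_one_eq_nil (by omega),
      PySem.List.pyRange_one_eq_nil (by omega)]
    simp [solveA_scan, solveB_loop]
  · obtain ⟨n, rfl⟩ : ∃ n : Nat, N = n := ⟨N.toNat, (Int.toNat_of_nonneg (by omega)).symm⟩
    obtain ⟨hS, hP, hb0⟩ := hpre.resolve_left (by omega)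
    rw [Int.toNat_natCast] at hb0 ⊢
    have hb : ∀ c ∈ S.toList.take n, c = '0' ∨ c = '1' := by
      intro c hc
      have := List.all_eq_true.mp hb0 c hc
      simpa using this
    have hns : n ≤ S.toList.length := by exact_mod_cast hS
    have hbuilt := build_inv S.toList n hns hb n 0
      (List.replicate n ((0 : Int), (0 : Int))) (by omega) (by omega) (by simp)
      (by intro k hk; omega)
      (by intro k _ hk; simp [hk])
    simp only [Nat.cast_zero] at hbuilt
    have hA := scanA_spec S.toList P.toList n _ hbuilt n (le_refl n) 0 (by omega)
      (by simp [pvT])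
    have hB := loopB_spec S.toList P.toList n hns hb n 0 (by omega) (by omega)
      0 0 (by simp [pvCnt]) (by simp [pvCnt])
    simp only [Nat.cast_zero, Nat.sub_zero] at hB
    rw [hA, hB, List.range_eq_range']
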